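-- pv_equiv track=rewrite | github.com/Leobertucci/Estudo-em-teoria-dos-Grafos | isomorphism.py | verify_homo
-- ===== SOURCE A (Python) =====
-- def gen_func(n, m):
--     funcoes = []
--     mapsto = [0] * n
--     while mapsto != [m - 1] * n:
--         funcoes.append(tuple(mapsto.copy()))
--         mapsto[n - 1] += 1
--         for i in range(1, n):
--             if mapsto[n - i] >= m:
--                 mapsto[n - i] = 0
--                 mapsto[n - i - 1] += 1
--     funcoes.append(tuple(mapsto))
--     return funcoes
--
-- def edges(G):
--     edgs = []
--     for i in range(len(G)):
--         for j in range(i + 1, len(G)):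
--             if G[i][j]: edgs.append((i, j))
--     return edgs
--
-- def verify_homo(G, H):
--     for f in gen_func(len(G), len(H)):
--         homo = True
--         # vejamos se f é homomorfismo:
--         for (i, j) in edges(G):
--             if H[f[i]][f[j]] == 0:
--                 homo = False
--                 break
--         if homo: return f
--     return False
-- ===== SOURCE B (Python) =====
-- def verify_homo(G, H):
--     n, m = len(G), len(H)
--
--     def extend(f):
--         k = len(f)
--         if k == n:
--             return tuple(f)
--         for t in range(m):
--             if all(not G[i][k] or H[f[i]][t] != 0 for i in range(k)):
--                 r = extend(f + [t])
--                 if r is not False: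
--                     return r
--         return False
--
--     return extend([])
-- ===== Notes on version B (the rewrite author's own statement) =====
-- stated objective: alternative
-- what changed: Replaces A's generate-all-m^n-maps-then-test loop (a while-loop odometer that materialises every map before testing any) with a recursive backtracking search that extends a partial assignment vertex by vertex, pruning a candidate target as soon as an already-assigned edge is violated; the first complete assignment found is A's lexicographically first homomorphism.
-- outside the precondition, e.g. on verify_homo([[0, 1], [0, 0]], [[1], [1]]): A returns (0, 0), B returns (0, 0)
import Mathlib
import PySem

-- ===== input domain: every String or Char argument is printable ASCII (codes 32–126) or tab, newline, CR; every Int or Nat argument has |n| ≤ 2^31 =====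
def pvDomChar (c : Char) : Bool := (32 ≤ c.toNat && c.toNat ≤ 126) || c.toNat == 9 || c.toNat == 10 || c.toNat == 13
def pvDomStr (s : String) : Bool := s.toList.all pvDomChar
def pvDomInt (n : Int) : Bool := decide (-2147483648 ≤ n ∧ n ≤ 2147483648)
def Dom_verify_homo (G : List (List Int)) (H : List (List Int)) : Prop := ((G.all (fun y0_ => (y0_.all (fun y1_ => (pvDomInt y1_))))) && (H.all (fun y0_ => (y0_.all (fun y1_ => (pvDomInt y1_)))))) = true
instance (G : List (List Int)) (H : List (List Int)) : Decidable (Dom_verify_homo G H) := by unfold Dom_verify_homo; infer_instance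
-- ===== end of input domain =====

-- B replaces A's "materialise all m^n candidate maps with a while-loop odometer, then test each"
-- by a recursive backtracking search over partial assignments that prunes violated branches
-- (objective: alternative algorithm; also avoids A's O(m^n) memory).

-- ===== PORT A =====
-- xs[i] for an index that is in range on every admitted input (Python raises otherwise;
-- out-of-range inputs are excluded by Pre_verify_homo, the port totalises with a default).
def pvRow (xs : List (List Int)) (i : Int) : List Int := (PySem.List.pyGet? xs i).getD []
def pvEnt (row : List Int) (j : Int) : Int := (PySem.List.pyGet? row j).getD 0
def pvAt (f : List Int) (i : Int) : Int := (PySem.List.pyGet? f i).getD 0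

-- the carry for-loop of gen_func: 'for i in range(1, n): if mapsto[n-i] >= m: …'
-- (i from pyRange 1 n 1 is ≥ 1 and < n, so the Python index n-i is the Nat ms.length - i.toNat)
def sweep (m : Int) (ms : List Int) : List Int :=
  (PySem.List.pyRange 1 (ms.length : Int) 1).foldl
    (fun cur i =>
      let j : Nat := ms.length - i.toNat
      if m ≤ cur.getD j 0 then (cur.set j 0).set (j - 1) (cur.getD (j - 1) 0 + 1) else cur)
    ms

-- one iteration of the while-loop body after the append: 'mapsto[n-1] += 1' then the carry loop
def incStep (m : Int) (ms : List Int) : List Int :=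
  sweep m (ms.set (ms.length - 1) (ms.getD (ms.length - 1) 0 + 1))

-- the while loop, fuel-bounded: m^n fuel suffices on every input A terminates on
-- (on m = 0 < n the Python loops forever; those inputs are outside Pre_verify_homo)
def genAux (m : Int) : Nat → List Int → List Int → List (List Int) → List (List Int)
  | 0, _, ms, acc => acc ++ [ms]
  | fuel + 1, target, ms, acc =>
      if ms = target then acc ++ [ms]
      else genAux m fuel target (incStep m ms) (acc ++ [ms])

def gen_func (n m : Nat) : List (List Int) :=
  genAux (m : Int) (m ^ n) (List.replicate n ((m : Int) - 1)) (List.replicate n 0) []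

def edges (G : List (List Int)) : List (Int × Int) :=
  (PySem.List.pyRange 0 (G.length : Int) 1).foldl
    (fun acc i =>
      (PySem.List.pyRange (i + 1) (G.length : Int) 1).foldl
        (fun acc2 j => if pvEnt (pvRow G i) j ≠ 0 then acc2 ++ [(i, j)] else acc2)
        acc)
    []

-- the inner 'for (i,j) in edges(G): if H[f[i]][f[j]] == 0: homo = False; break' loop
def homoOkA (H : List (List Int)) (f : List Int) (e : Int × Int) : Bool :=
  !(pvEnt (pvRow H (pvAt f e.1)) (pvAt f e.2) == 0)

def verify_homo (G : List (List Int)) (H : List (List Int)) : Option (List Int) :=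
  (gen_func G.length H.length).find? (fun f => (edges G).all (homoOkA H f))

-- ===== PORT B =====
-- 'all(not G[i][k] or H[f[i]][t] != 0 for i in range(k))' with k = len(f); the values of f are
-- the nonnegative ints previously drawn from range(m), so indexing H by f[i] is .toNat here
def consB (G H : List (List Int)) (f : List Int) (t : Nat) : Bool :=
  (List.range f.length).all
    (fun i => (G.getD i []).getD f.length 0 == 0
              || !((H.getD (f.getD i 0).toNat []).getD t 0 == 0))

-- extend(f) of B, structural on gas = n - len(f): gas = 0 is the 'k == n' base case
def extendF (G H : List (List Int)) : Nat → List Int → Option (List Int)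
  | 0, f => some f
  | gas + 1, f =>
      (List.range H.length).findSome?
        (fun t => if consB G H f t then extendF G H gas (f ++ [(t : Int)]) else none)

def verify_homo_alt (G : List (List Int)) (H : List (List Int)) : Option (List Int) :=
  extendF G H G.length []

-- ===== PRECONDITION & SPEC =====
-- Pre_ excludes: H = [] with G ≠ [] (A's while loop never terminates there); a row G[i],
-- i < len(G)-1, shorter than len(G) (edges(G) raises IndexError); and, when G has an edge,
-- any row of H shorter than len(H) (the homomorphism test indexes into H's rows).  The last
-- conjunct is slightly coarser than Python's path-dependent access pattern, so it also drops
-- some inputs on which A returns without ever touching the short H row (see the cite).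
def Pre_verify_homo (G : List (List Int)) (H : List (List Int)) : Prop :=
  (G = [] ∨ H ≠ []) ∧
  (∀ i < G.length, i + 1 < G.length → G.length ≤ (G.getD i []).length) ∧
  ((∃ i < G.length, ∃ j < G.length, i < j ∧ (G.getD i []).getD j 0 ≠ 0) →
    ∀ row ∈ H, H.length ≤ row.length)

instance (G : List (List Int)) (H : List (List Int)) : Decidable (Pre_verify_homo G H) := by
  unfold Pre_verify_homo; infer_instance

def pvWitness_verify_homo : List (List Int) × List (List Int) :=
  ([[0, 1], [0, 0]], [[0, 1], [1, 0]])

def Spec_verify_homo (G : List (List Int)) (H : List (List Int)) (out : Option (List Int)) : Prop :=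
  out = verify_homo_alt G H
instance (G : List (List Int)) (H : List (List Int)) (out : Option (List Int)) : Decidable (Spec_verify_homo G H out) := by unfold Spec_verify_homo; infer_instance

-- ===== CLAIM (what is proved, stated in full; the proofs are below) =====
def Claim_equal_verify_homo : Prop := ∀ (G : List (List Int)) (H : List (List Int)), Dom_verify_homo G H → Pre_verify_homo G H → Spec_verify_homo G H (verify_homo G H)

-- ===== LEMMAS AND PROOFS =====

-- digits of v in base m, least significant first
def digRev : Nat → Nat → Nat → List Int
  | 0, _, _ => []
  | n + 1, m, v => ((v % m : Nat) : Int) :: digRev n m (v / m)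

-- the same number as the list A's counter holds: most significant digit first
def msList (n m v : Nat) : List Int := (digRev n m v).reverse

def bumpHead : List Int → List Int
  | [] => []
  | d :: ds => (d + 1) :: ds

def bumpLast : List Int → List Int
  | [] => []
  | [d] => [d + 1]
  | d :: e :: ds => d :: bumpLast (e :: ds)

-- carry propagation, least-significant digit first; the most significant digit is never tested
def carry (m : Int) : List Int → List Int
  | [] => []
  | [d] => [d]
  | d :: e :: ds => if m ≤ d then 0 :: carry m ((e + 1) :: ds) else d :: carry m (e :: ds)
  termination_by l => l.length
  decreasing_by all_goals simp

-- ---------- Part 1: the while-loop odometer of gen_func counts in base m ----------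

-- one carry-loop step at index j, as performed by sweep
def stepN (m : Int) (cur : List Int) (j : Nat) : List Int :=
  if m ≤ cur.getD j 0 then (cur.set j 0).set (j - 1) (cur.getD (j - 1) 0 + 1) else cur

lemma sweep_eq (m : Int) (ms : List Int) :
    sweep m ms = ((List.range' 1 (ms.length - 1)).reverse).foldl (stepN m) ms := by
  unfold sweep
  rw [PySem.List.pyRange_one, List.foldl_map, List.reverse_range', List.foldl_map]
  have hlen : ((ms.length : Int) - 1).toNat = ms.length - 1 := by omega
  rw [hlen]
  apply PySem.List.foldl_congr_mem
  intro acc k _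
  have h1 : ((1 : Int) + (k : Int)).toNat = 1 + k := by omega
  simp only [stepN, h1]
  have h2 : ms.length - (1 + k) = 1 + (ms.length - 1) - 1 - k := by omega
  rw [h2]

lemma stepN_length (m : Int) (cur : List Int) (j : Nat) : (stepN m cur j).length = cur.length := by
  unfold stepN; split <;> simp

lemma stepN_append (m : Int) (zs : List Int) (c : Int) (j : Nat) (hj : j < zs.length) :
    stepN m (zs ++ [c]) j = stepN m zs j ++ [c] := by
  unfold stepN
  rw [List.getD_append _ _ _ _ hj,
      List.getD_append _ _ _ _ (show j - 1 < zs.length by omega)]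
  split
  · rw [List.set_append, if_pos hj, List.set_append,
      if_pos (show j - 1 < (zs.set j 0).length by simp only [List.length_set]; omega)]
  · rfl

lemma foldl_stepN_append (m : Int) (js : List Nat) (zs : List Int) (c : Int)
    (h : ∀ j ∈ js, j < zs.length) :
    js.foldl (stepN m) (zs ++ [c]) = js.foldl (stepN m) zs ++ [c] := by
  induction js generalizing zs with
  | nil => rfl
  | cons j js ih =>
      simp only [List.foldl_cons]
      rw [stepN_append m zs c j (h j (by simp))]
      exact ih (stepN m zs j)
        (fun x hx => by rw [stepN_length]; exact h x (List.mem_cons_of_mem _ hx))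

lemma set_last_eq (ms : List Int) (h : ms ≠ []) :
    ms.set (ms.length - 1) (ms.getD (ms.length - 1) 0 + 1) = (bumpHead ms.reverse).reverse := by
  rcases hrev : ms.reverse with _ | ⟨d, t⟩
  · exact absurd (by simpa using congrArg List.reverse hrev) h
  · have hms : ms = t.reverse ++ [d] := by
      rw [← List.reverse_reverse ms, hrev]; simp
    rw [hms]
    have hl : (t.reverse ++ [d]).length - 1 = t.reverse.length := by simp
    rw [hl, List.getD_append_right _ _ _ _ (le_refl _), List.set_append, if_neg (lt_irrefl _)]
    simp [bumpHead]

lemma carry_eq_foldl (m : Int) : ∀ (N : Nat) (ms : List Int), ms.length ≤ N →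
    ((List.range' 1 (ms.length - 1)).reverse).foldl (stepN m) ms = (carry m ms.reverse).reverse := by
  intro N
  induction N with
  | zero =>
      intro ms h
      have : ms = [] := List.eq_nil_of_length_eq_zero (by omega)
      subst this; simp [carry]
  | succ N ih =>
      intro ms hlen
      rcases hrev : ms.reverse with _ | ⟨c, rest⟩
      · have : ms = [] := by simpa using congrArg List.reverse hrev
        subst this; simp [carry]
      · have hms : ms = rest.reverse ++ [c] := by
          rw [← List.reverse_reverse ms, hrev]; simp
        rcases rest with _ | ⟨e, t⟩
        · rw [hms]; simp [carry]
        · have hml : ms.length = t.length + 2 := by rw [hms]; simp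
          rw [hms]
          set zs := (e :: t).reverse with hzs
          have hzlen : zs.length = t.length + 1 := by simp [hzs]
          have hmslen : (zs ++ [c]).length - 1 = t.length + 1 := by simp [hzlen]
          rw [hmslen]
          have hsplit : List.range' 1 (t.length + 1) = List.range' 1 t.length ++ [1 + t.length] := by
            simpa using (List.range'_concat (step := 1) (s := 1) (n := t.length))
          rw [hsplit, List.reverse_append, List.reverse_singleton, List.singleton_append,
            List.foldl_cons]
          have h1 : 1 + t.length = zs.length := by omega
          have e1 : (zs ++ [c]).getD zs.length 0 = c := by
            rw [List.getD_append_right _ _ _ _ (le_refl _)]; simp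
          have e2 : (zs ++ [c]).set zs.length 0 = zs ++ [0] := by
            rw [List.set_append, if_neg (lt_irrefl _)]; simp
          have e3 : (zs ++ [c]).getD (zs.length - 1) 0 = zs.getD (zs.length - 1) 0 :=
            List.getD_append _ _ _ _ (by omega)
          have e4 : ∀ x : Int, (zs ++ [0]).set (zs.length - 1) x = zs.set (zs.length - 1) x ++ [0] := by
            intro x; rw [List.set_append, if_pos (by omega)]
          have hget : stepN m (zs ++ [c]) (1 + t.length) =
              if m ≤ c then (zs.set (zs.length - 1) (zs.getD (zs.length - 1) 0 + 1)) ++ [0]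
              else zs ++ [c] := by
            unfold stepN
            rw [h1, e1, e3, e2, e4]
          rw [hget]
          have hne : zs ≠ [] := by simp [hzs]
          have hbump : zs.set (zs.length - 1) (zs.getD (zs.length - 1) 0 + 1) =
              ((e + 1) :: t).reverse := by
            rw [set_last_eq zs hne]; rw [hzs]; simp [bumpHead]
          have hjs : ∀ j ∈ (List.range' 1 t.length).reverse, j < t.length + 1 := by
            intro j hj
            have := List.mem_range'_1.mp (List.mem_reverse.mp hj)
            omega
          split
          · rw [hbump]
            rw [foldl_stepN_append m _ _ _ (by
              intro j hj; simp only [List.length_reverse, List.length_cons]; exact hjs j hj)]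
            have hih := ih (((e + 1) :: t).reverse) (by simp; omega)
            rw [List.length_reverse, List.length_cons, Nat.add_sub_cancel,
              List.reverse_reverse] at hih
            rw [hih]
            simp [carry, *]
          · rw [foldl_stepN_append m _ _ _ (by intro j hj; rw [hzlen]; exact hjs j hj)]
            have hih := ih zs (by rw [hzlen]; omega)
            rw [hzlen, Nat.add_sub_cancel] at hih
            rw [hih]
            rw [hzs, List.reverse_reverse]
            simp [carry, *]

-- ---------- Part 2: digits in base m ----------

lemma digRev_length (n m v : Nat) : (digRev n m v).length = n := by
  induction n generalizing v with
  | zero => rfl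
  | succ n ih => simp [digRev, ih]

lemma msList_length (n m v : Nat) : (msList n m v).length = n := by
  simp [msList, digRev_length]

lemma digRev_lt (n m v : Nat) (hm : 0 < m) : ∀ d ∈ digRev n m v, d < (m : Int) := by
  induction n generalizing v with
  | zero => simp [digRev]
  | succ n ih =>
      intro d hd
      rcases List.mem_cons.mp hd with h | h
      · subst h; exact_mod_cast Nat.mod_lt _ hm
      · exact ih _ d h

lemma carry_cons_of_lt (m d : Int) (l : List Int) (h : d < m) :
    carry m (d :: l) = d :: carry m l := by
  rcases l with _ | ⟨e, t⟩
  · simp [carry]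
  · rw [carry, if_neg (by omega)]

lemma carry_noop (m : Int) (l : List Int) (h : ∀ d ∈ l, d < m) : carry m l = l := by
  induction l with
  | nil => simp [carry]
  | cons d l ih =>
      rw [carry_cons_of_lt m d l (h d (by simp)),
        ih (fun x hx => h x (List.mem_cons_of_mem _ hx))]

lemma carry_dig (n m : Nat) (hm : 0 < m) : ∀ v : Nat, v + 1 < m ^ n →
    carry (m : Int) (bumpHead (digRev n m v)) = digRev n m (v + 1) := by
  induction n with
  | zero => intro v hv; simp at hv
  | succ n ih =>
      intro v hv
      have hvm : v % m < m := Nat.mod_lt v hm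
      have hda := Nat.div_add_mod v m
      simp only [digRev, bumpHead]
      rcases Nat.lt_or_ge (v % m + 1) m with hlt | hge
      · -- no carry out of the least-significant digit
        have h2 : v + 1 = (v % m + 1) + m * (v / m) := by omega
        have hmod : (v + 1) % m = v % m + 1 := by
          rw [h2, Nat.add_mul_mod_self_left, Nat.mod_eq_of_lt hlt]
        have hdiv : (v + 1) / m = v / m := by
          rw [h2, Nat.add_mul_div_left _ _ hm, Nat.div_eq_of_lt hlt, Nat.zero_add]
        rw [carry_cons_of_lt _ _ _ (by exact_mod_cast hlt),
          carry_noop _ _ (digRev_lt n m (v / m) hm), hmod, hdiv]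
        push_cast
        ring_nf
      · -- the least-significant digit overflows
        have hr : v % m + 1 = m := by omega
        have hv1 : v + 1 = m * (v / m + 1) := by
          rw [Nat.mul_succ]; omega
        have hdiv : (v + 1) / m = v / m + 1 := by
          rw [hv1, Nat.mul_div_cancel_left _ hm]
        have hmod0 : (v + 1) % m = 0 := by rw [hv1, Nat.mul_mod_right]
        have hlt' : v / m + 1 < m ^ n := by
          have hmul : m * (v / m + 1) < m * m ^ n := by
            rw [← hv1]
            calc v + 1 < m ^ (n + 1) := hv
              _ = m * m ^ n := by ring
          exact Nat.lt_of_mul_lt_mul_left hmul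
        rcases n with _ | n
        · simp at hlt'
        · simp only [digRev] at ih ⊢
          rw [carry, if_pos (by exact_mod_cast Nat.le_of_eq hr.symm)]
          have := ih (v / m) hlt'
          simp only [bumpHead] at this
          rw [this, hmod0, hdiv]
          simp

lemma digRev_zero (n m : Nat) : digRev n m 0 = List.replicate n 0 := by
  induction n with
  | zero => rfl
  | succ n ih => simp [digRev, Nat.zero_mod, Nat.zero_div, ih, List.replicate_succ]

lemma digRev_last (n m : Nat) (hm : 0 < m) :
    digRev n m (m ^ n - 1) = List.replicate n ((m : Int) - 1) := by
  induction n with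
  | zero => rfl
  | succ n ih =>
      have hpow : 0 < m ^ n := pow_pos hm n
      have h3 : m * (m ^ n - 1) = m * m ^ n - m := by
        rw [Nat.mul_sub, Nat.mul_one]
      have hx : m ^ (n + 1) - 1 = (m - 1) + m * (m ^ n - 1) := by
        have hp : m ^ (n + 1) = m * m ^ n := by ring
        have hle : m ≤ m * m ^ n := Nat.le_mul_of_pos_right m hpow
        omega
      have hmod : (m ^ (n + 1) - 1) % m = m - 1 := by
        rw [hx, Nat.add_mul_mod_self_left, Nat.mod_eq_of_lt (by omega)]
      have hdiv : (m ^ (n + 1) - 1) / m = m ^ n - 1 := by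
        rw [hx, Nat.add_mul_div_left _ _ hm, Nat.div_eq_of_lt (by omega), Nat.zero_add]
      simp only [digRev, hmod, hdiv, ih, List.replicate_succ, List.cons.injEq]
      constructor
      · rw [Nat.cast_sub hm]; simp
      · trivial

lemma digRev_inj (n m : Nat) : ∀ v w : Nat, v < m ^ n → w < m ^ n →
    digRev n m v = digRev n m w → v = w := by
  induction n with
  | zero => intro v w hv hw _; simp at hv hw; omega
  | succ n ih =>
      intro v w hv hw h
      have hm : 0 < m := by
        rcases Nat.eq_zero_or_pos m with h0 | h0
        · subst h0; simp at hv
        · exact h0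
      simp only [digRev, List.cons.injEq] at h
      have hmod : v % m = w % m := by exact_mod_cast h.1
      have hvd : v / m < m ^ n := by
        rw [Nat.div_lt_iff_lt_mul hm, ← pow_succ]; exact hv
      have hwd : w / m < m ^ n := by
        rw [Nat.div_lt_iff_lt_mul hm, ← pow_succ]; exact hw
      have e1 : v / m = w / m := ih (v / m) (w / m) hvd hwd h.2
      have h1 := Nat.div_add_mod v m
      have h2 := Nat.div_add_mod w m
      rw [e1, hmod] at h1
      omega

lemma msList_inj (n m v w : Nat) (hv : v < m ^ n) (hw : w < m ^ n)
    (h : msList n m v = msList n m w) : v = w := by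
  apply digRev_inj n m v w hv hw
  have := congrArg List.reverse h
  simpa [msList] using this

lemma incStep_dig (n m v : Nat) (hm : 0 < m) (hn : 0 < n) (hv : v + 1 < m ^ n) :
    incStep (m : Int) (msList n m v) = msList n m (v + 1) := by
  have hlen : (msList n m v).length = n := msList_length n m v
  have hne : msList n m v ≠ [] := by
    intro h; rw [h] at hlen; simp at hlen; omega
  unfold incStep
  rw [set_last_eq _ hne, sweep_eq,
    carry_eq_foldl m ((bumpHead ((msList n m v).reverse)).reverse).length _ (le_refl _),
    List.reverse_reverse]
  have hrev : (msList n m v).reverse = digRev n m v := by simp [msList]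
  rw [hrev, carry_dig n m hm v hv]
  rfl

-- ---------- Part 3: gen_func produces exactly the base-m counting sequence ----------

lemma genAux_eq (n m : Nat) (hm : 0 < m) : ∀ (fuel v : Nat) (acc : List (List Int)),
    v < m ^ n → m ^ n - 1 - v ≤ fuel →
    genAux (m : Int) fuel (msList n m (m ^ n - 1)) (msList n m v) acc
      = acc ++ (List.range' v (m ^ n - v)).map (msList n m) := by
  intro fuel
  induction fuel with
  | zero =>
      intro v acc hv hf
      have hveq : v = m ^ n - 1 := by omega
      subst hveq
      have h1 : m ^ n - (m ^ n - 1) = 1 := by have := pow_pos hm n; omega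
      rw [genAux, h1]
      simp
  | succ fuel ih =>
      intro v acc hv hf
      by_cases hveq : v = m ^ n - 1
      · subst hveq
        have h1 : m ^ n - (m ^ n - 1) = 1 := by have := pow_pos hm n; omega
        rw [genAux, if_pos rfl, h1]
        simp
      · have hne : msList n m v ≠ msList n m (m ^ n - 1) := by
          intro h
          exact hveq (msList_inj n m v (m ^ n - 1) hv (by have := pow_pos hm n; omega) h)
        rw [genAux, if_neg hne]
        have hv1 : v + 1 < m ^ n := by omega
        have hn0 : 0 < n := by
          rcases Nat.eq_zero_or_pos n with h0 | h0
          · exfalso; subst h0; simp at hv hveq; omega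
          · exact h0
        rw [incStep_dig n m v hm hn0 hv1, ih (v + 1) (acc ++ [msList n m v]) hv1 (by omega)]
        have hk : m ^ n - v = (m ^ n - (v + 1)) + 1 := by omega
        rw [hk, List.range'_succ]
        simp

lemma gen_func_eq (n m : Nat) (h : 0 < m ∨ n = 0) :
    gen_func n m = (List.range (m ^ n)).map (msList n m) := by
  rcases h with hm | hn
  · unfold gen_func
    have h1 : List.replicate n ((m : Int) - 1) = msList n m (m ^ n - 1) := by
      rw [msList, digRev_last n m hm]; simp
    have h0 : List.replicate n (0 : Int) = msList n m 0 := by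
      rw [msList, digRev_zero]; simp
    rw [h1, h0, genAux_eq n m hm (m ^ n) 0 [] (pow_pos hm n) (by omega)]
    simp [List.range_eq_range']
  · subst hn
    simp [gen_func, genAux, msList, digRev]

-- ---------- Part 4: edges and the homomorphism test ----------

def entG (G : List (List Int)) (a b : Nat) : Int := (G.getD a []).getD b 0
def entH (H : List (List Int)) (x y : Int) : Int := pvEnt (pvRow H x) y
def okA (G H : List (List Int)) (f : List Int) : Bool := (edges G).all (homoOkA H f)

-- edges with j < len(f) already hold for the partial assignment f
def okPrefix (G H : List (List Int)) (f : List Int) : Prop :=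
  ∀ a b : Nat, a < b → b < f.length → entG G a b ≠ 0 →
    entH H (pvAt f (a : Int)) (pvAt f (b : Int)) ≠ 0

lemma pvRow_natCast (xs : List (List Int)) (a : Nat) : pvRow xs (a : Int) = xs.getD a [] := by
  rw [pvRow, PySem.List.pyGet?_natCast, List.getD_eq_getElem?_getD]

lemma pvEnt_natCast (row : List Int) (b : Nat) : pvEnt row (b : Int) = row.getD b 0 := by
  rw [pvEnt, PySem.List.pyGet?_natCast, List.getD_eq_getElem?_getD]

lemma pvAt_natCast (f : List Int) (a : Nat) : pvAt f (a : Int) = f.getD a 0 := by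
  rw [pvAt, PySem.List.pyGet?_natCast, List.getD_eq_getElem?_getD]

lemma entH_toNat (H : List (List Int)) (x : Int) (t : Nat) (hx : 0 ≤ x) :
    entH H x (t : Int) = (H.getD x.toNat []).getD t 0 := by
  rw [entH, show x = ((x.toNat : Nat) : Int) by omega, pvRow_natCast, pvEnt_natCast]
  simp [show max x 0 = x by omega]

lemma edges_eq (G : List (List Int)) :
    edges G = (PySem.List.pyRange 0 (G.length : Int)).flatMap
      (fun i => ((PySem.List.pyRange (i + 1) (G.length : Int)).filter
          (fun j => decide (pvEnt (pvRow G i) j ≠ 0))).map (fun j => (i, j))) := by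
  unfold edges
  rw [PySem.List.foldl_congr_mem (g := fun acc i =>
    acc ++ ((PySem.List.pyRange (i + 1) (G.length : Int)).filter
      (fun j => decide (pvEnt (pvRow G i) j ≠ 0))).map (fun j => (i, j)))]
  · exact PySem.List.foldl_append_eq_flatMap _ _ _
  · intro acc i _
    exact PySem.List.foldl_append_ite _ _ _ _

lemma mem_edges (G : List (List Int)) (x : Int × Int) :
    x ∈ edges G ↔ ∃ a b : Nat, x = ((a : Int), (b : Int)) ∧ a < b ∧ b < G.length ∧
      entG G a b ≠ 0 := by
  rw [edges_eq]
  simp only [List.mem_flatMap, List.mem_map, List.mem_filter,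
    PySem.List.mem_pyRange_one, decide_eq_true_eq]
  constructor
  · rintro ⟨i, ⟨hi0, hin⟩, j, ⟨⟨hji, hjn⟩, hent⟩, rfl⟩
    have hia : i = ((i.toNat : Nat) : Int) := by omega
    have hjb : j = ((j.toNat : Nat) : Int) := by omega
    refine ⟨i.toNat, j.toNat, by rw [← hia, ← hjb], by omega, by omega, ?_⟩
    rw [hia, hjb, pvRow_natCast, pvEnt_natCast] at hent
    exact hent
  · rintro ⟨a, b, rfl, hab, hbn, hent⟩
    refine ⟨(a : Int), ⟨by omega, by omega⟩, (b : Int), ⟨⟨by omega, by omega⟩, ?_⟩, rfl⟩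
    rw [pvRow_natCast, pvEnt_natCast]
    exact hent

lemma okA_iff (G H : List (List Int)) (f : List Int) :
    okA G H f = true ↔ ∀ a b : Nat, a < b → b < G.length → entG G a b ≠ 0 →
      entH H (pvAt f (a : Int)) (pvAt f (b : Int)) ≠ 0 := by
  rw [okA, List.all_eq_true]
  constructor
  · intro h a b hab hbn hent
    have := h ((a : Int), (b : Int)) ((mem_edges G _).mpr ⟨a, b, rfl, hab, hbn, hent⟩)
    simpa [homoOkA, entH] using this
  · intro h e he
    obtain ⟨a, b, rfl, hab, hbn, hent⟩ := (mem_edges G e).mp he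
    have := h a b hab hbn hent
    simpa [homoOkA, entH] using this

lemma consB_iff (G H : List (List Int)) (f : List Int) (t : Nat) :
    consB G H f t = true ↔ ∀ i : Nat, i < f.length → entG G i f.length ≠ 0 →
      (H.getD (f.getD i 0).toNat []).getD t 0 ≠ 0 := by
  rw [consB, List.all_eq_true]
  constructor
  · intro h i hi hent
    have := h i (List.mem_range.mpr hi)
    simp only [Bool.or_eq_true, beq_iff_eq, Bool.not_eq_eq_eq_not, Bool.not_true,
      beq_eq_false_iff_ne] at this
    rcases this with h0 | h0
    · exact absurd h0 hent
    · simpa using h0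
  · intro h i hi
    simp only [Bool.or_eq_true, beq_iff_eq, Bool.not_eq_eq_eq_not, Bool.not_true,
      beq_eq_false_iff_ne]
    rcases eq_or_ne ((G.getD i []).getD f.length 0) 0 with h0 | h0
    · exact Or.inl h0
    · exact Or.inr (h i (List.mem_range.mp hi) h0)

-- ---------- Part 5: generic find? plumbing ----------

lemma find?_flatMap {α β : Type} (l : List α) (g : α → List β) (p : β → Bool) :
    (l.flatMap g).find? p = l.findSome? (fun x => (g x).find? p) := by
  induction l with
  | nil => simp
  | cons a l ih =>
      rw [List.flatMap_cons, List.find?_append, List.findSome?_cons, ih]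
      cases h : (g a).find? p <;> simp

lemma findSome?_congr {α β : Type} (l : List α) (f g : α → Option β)
    (h : ∀ x ∈ l, f x = g x) : l.findSome? f = l.findSome? g := by
  induction l with
  | nil => rfl
  | cons a l ih =>
      rw [List.findSome?_cons, List.findSome?_cons, h a (by simp),
        ih (fun x hx => h x (List.mem_cons_of_mem _ hx))]

lemma range_mul_flatMap (a b : Nat) :
    List.range (a * b) = (List.range a).flatMap (fun t => (List.range b).map (fun r => t * b + r)) := by
  induction a with
  | zero => simp
  | succ a ih =>
      rw [Nat.succ_mul, List.range_add, List.range_succ, List.flatMap_append, ih]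
      simp

lemma msList_succ (g m t r : Nat) (ht : t < m) (hr : r < m ^ g) :
    msList (g + 1) m (t * m ^ g + r) = (t : Int) :: msList g m r := by
  have hm : 0 < m := by omega
  induction g generalizing t r with
  | zero =>
      have : r = 0 := by simpa using hr
      subst this
      simp [msList, digRev, Nat.mod_eq_of_lt ht]
  | succ g ih =>
      have hvmod : (t * m ^ (g + 1) + r) % m = r % m := by
        rw [show t * m ^ (g + 1) + r = r + (t * m ^ g) * m by ring, Nat.add_mul_mod_self_right]
      have hvdiv : (t * m ^ (g + 1) + r) / m = t * m ^ g + r / m := by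
        rw [show t * m ^ (g + 1) + r = r + (t * m ^ g) * m by ring,
          Nat.add_mul_div_right _ _ hm, Nat.add_comm]
      have hrd : r / m < m ^ g := by
        rw [Nat.div_lt_iff_lt_mul hm, ← pow_succ]; exact hr
      have hih := ih t (r / m) ht hrd
      simp only [msList, digRev, List.reverse_cons] at hih ⊢
      rw [hvmod, hvdiv, hih]
      simp

-- ---------- Part 6: the backtracking search finds the first full assignment ----------

lemma pvAt_append_lt (f s : List Int) (i : Nat) (h : i < f.length) :
    pvAt (f ++ s) (i : Int) = f.getD i 0 := by
  rw [pvAt_natCast, List.getD_append _ _ _ _ h]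

lemma pvAt_append_mid (f s : List Int) (x : Int) :
    pvAt ((f ++ [x]) ++ s) ((f.length : Nat) : Int) = x := by
  rw [pvAt_natCast, List.append_assoc, List.getD_append_right _ _ _ _ (le_refl _)]
  simp

lemma getD_nonneg_of_mem (f : List Int) (i : Nat) (hi : i < f.length)
    (hnn : ∀ x ∈ f, 0 ≤ x) : 0 ≤ f.getD i 0 := by
  rw [List.getD_eq_getElem f 0 hi]
  exact hnn _ (List.getElem_mem hi)

lemma okPrefix_extend (G H : List (List Int)) (f : List Int) (t : Nat)
    (hnn : ∀ x ∈ f, 0 ≤ x) (hpre : okPrefix G H f) (hc : consB G H f t = true) :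
    okPrefix G H (f ++ [(t : Int)]) := by
  intro a b hab hbl hent
  simp only [List.length_append, List.length_cons, List.length_nil] at hbl
  rcases Nat.lt_or_ge b f.length with hb | hb
  · have ha : a < f.length := by omega
    rw [pvAt_append_lt f _ a ha, pvAt_append_lt f _ b hb]
    have := hpre a b hab hb hent
    rw [pvAt_natCast, pvAt_natCast] at this
    exact this
  · have hbe : b = f.length := by omega
    subst hbe
    have ha : a < f.length := hab
    rw [pvAt_append_lt f _ a ha]
    have h2 : pvAt (f ++ [(t : Int)]) ((f.length : Nat) : Int) = (t : Int) := by
      rw [pvAt_natCast, List.getD_append_right _ _ _ _ (le_refl _)]; simp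
    rw [h2]
    have hz := (consB_iff G H f t).mp hc a ha hent
    rw [entH_toNat H _ t (getD_nonneg_of_mem f a ha hnn)]
    exact hz

lemma extendF_eq (G H : List (List Int)) : ∀ (gas : Nat) (f : List Int),
    f.length + gas = G.length → (∀ x ∈ f, 0 ≤ x) → okPrefix G H f →
    extendF G H gas f
      = ((List.range (H.length ^ gas)).map (fun v => f ++ msList gas H.length v)).find?
          (fun g => (edges G).all (homoOkA H g)) := by
  intro gas
  induction gas with
  | zero =>
      intro f hlen hnn hpre
      have hfl : f.length = G.length := by omega
      have hmap : (List.range (H.length ^ 0)).map (fun v => f ++ msList 0 H.length v) = [f] := by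
        simp [msList, digRev]
      rw [extendF, hmap]
      have hok : (edges G).all (homoOkA H f) = true := by
        have : okA G H f = true := (okA_iff G H f).mpr
          (fun a b hab hbn hent => hpre a b hab (by omega) hent)
        exact this
      exact (List.find?_cons_of_pos (p := fun g => (edges G).all (homoOkA H g)) (l := []) hok).symm
  | succ gas ih =>
      intro f hlen hnn hpre
      have hpow : H.length ^ (gas + 1) = H.length * H.length ^ gas := by ring
      rw [extendF, hpow, range_mul_flatMap, List.map_flatMap, find?_flatMap]
      apply findSome?_congr
      intro t ht
      have htm : t < H.length := List.mem_range.mp ht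
      rw [List.map_map]
      have hmap : (List.range (H.length ^ gas)).map
            ((fun v => f ++ msList (gas + 1) H.length v) ∘ (fun r => t * H.length ^ gas + r))
          = (List.range (H.length ^ gas)).map
            (fun r => (f ++ [(t : Int)]) ++ msList gas H.length r) := by
        apply List.map_congr_left
        intro r hr
        simp only [Function.comp_apply]
        rw [msList_succ gas H.length t r htm (List.mem_range.mp hr)]
        simp
      rw [hmap]
      by_cases hc : consB G H f t = true
      · rw [if_pos hc]
        exact ih (f ++ [(t : Int)])
          (by simp only [List.length_append, List.length_cons, List.length_nil]; omega)
          (by intro x hx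
              rcases List.mem_append.mp hx with h | h
              · exact hnn x h
              · simp at h; subst h; exact Int.natCast_nonneg t)
          (okPrefix_extend G H f t hnn hpre hc)
      · rw [if_neg hc]
        symm
        rw [List.find?_eq_none]
        intro g hg hall
        obtain ⟨r, hr, rfl⟩ := List.mem_map.mp hg
        have hnotall : ¬ (∀ i : Nat, i < f.length → entG G i f.length ≠ 0 →
            (H.getD (f.getD i 0).toNat []).getD t 0 ≠ 0) := by
          rw [← consB_iff]; exact hc
        push Not at hnotall
        obtain ⟨i, hi, hent, hzero⟩ := hnotall
        have hok := (okA_iff G H _).mp hall i f.length hi (by omega) hent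
        have h1 : pvAt ((f ++ [(t : Int)]) ++ msList gas H.length r) (i : Int) = f.getD i 0 := by
          rw [List.append_assoc]
          exact pvAt_append_lt f _ i hi
        have h2 : pvAt ((f ++ [(t : Int)]) ++ msList gas H.length r)
            ((f.length : Nat) : Int) = (t : Int) := pvAt_append_mid f _ _
        rw [h1, h2, entH_toNat H _ t (getD_nonneg_of_mem f i hi hnn)] at hok
        exact hok hzero

theorem verify_homo_spec : Claim_equal_verify_homo := by
  intro G H _ hpre
  unfold Spec_verify_homo
  obtain ⟨h1, -, -⟩ := hpre
  have hm : 0 < H.length ∨ G.length = 0 := by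
    rcases h1 with h | h
    · right; simp [h]
    · left; exact List.length_pos_iff.mpr h
  unfold verify_homo verify_homo_alt
  rw [gen_func_eq G.length H.length hm,
    extendF_eq G H G.length [] (by simp) (by simp)
      (by intro a b hab hbl hent; simp at hbl)]
  simp only [List.nil_append]
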